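-- pv_equiv track=rewrite | github.com/brokentelescope/CCC-Solutions | 09/CCC '09 J4 - Signage.py | dots
-- ===== SOURCE A (Python) =====
-- def dots(extra, words):
--     distribution = [0] * (words-1)
--
--     if words == 1:
--         return [extra]
--
--     while extra != 0:
--         for x in range(words-1):
--             if extra != 0:
--                 distribution[x] = distribution[x] + 1
--                 extra -= 1
--             else:
--                 break
--
--     distribution.append(0)
--     return distribution
-- ===== SOURCE B (Python) =====
-- def dots(extra, words):
--     if words == 1:
--         return [extra]
--     n = words - 1
--     q, r = divmod(extra, n)
--     return [q + 1] * r + [q] * (n - r) + [0]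
-- ===== Notes on version B (the rewrite author's own statement) =====
-- stated objective: faster
-- what changed: Replaces the round-robin while/for loop that hands out one unit at a time with a closed-form divmod: quotient to every gap, remainder to the first gaps.
import Mathlib
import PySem

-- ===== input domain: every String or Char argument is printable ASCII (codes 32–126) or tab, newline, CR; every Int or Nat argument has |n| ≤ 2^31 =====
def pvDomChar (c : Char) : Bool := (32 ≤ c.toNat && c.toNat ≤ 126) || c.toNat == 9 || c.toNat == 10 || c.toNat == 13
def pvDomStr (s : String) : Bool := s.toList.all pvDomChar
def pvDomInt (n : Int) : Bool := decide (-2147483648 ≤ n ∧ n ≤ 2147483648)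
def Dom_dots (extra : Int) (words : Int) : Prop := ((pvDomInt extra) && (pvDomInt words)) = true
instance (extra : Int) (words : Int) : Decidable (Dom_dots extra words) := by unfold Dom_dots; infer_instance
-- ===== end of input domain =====

-- B replaces A's unit-by-unit round-robin loop with a closed-form divmod distribution (faster: O(words) vs O(extra+words)).


-- ===== PORT A =====
-- inner 'for x in range(words-1): if extra != 0: distribution[x] += 1; extra -= 1 else: break'
def dotsFor : List Nat → Int → List Int → Int × List Int
  | [], extra, dist => (extra, dist)
  | x :: xs, extra, dist =>
    if extra ≠ 0 then dotsFor xs (extra - 1) (dist.set x (dist.getD x 0 + 1))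
    else (extra, dist)

theorem dotsFor_fst_lt (xs : List Nat) (extra : Int) (dist : List Int)
    (hpos : 0 < extra) (hxs : xs ≠ []) : ((dotsFor xs extra dist).1).toNat < extra.toNat := by
  induction xs generalizing extra dist with
  | nil => exact absurd rfl hxs
  | cons x xs ih =>
    simp only [dotsFor, if_pos (by omega : extra ≠ 0)]
    rcases xs with _ | ⟨y, ys⟩
    · simp [dotsFor]; omega
    · by_cases h1 : 0 < extra - 1
      · exact lt_of_lt_of_le (ih _ _ h1 (by simp)) (by omega)
      · have : extra = 1 := by omega
        subst this
        simp [dotsFor]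

-- 'while extra != 0: <for pass>'; the guard makes the loop total — on inputs where the
-- Python loop would not terminate (extra < 0, or extra > 0 with words ≤ 1) it stops, outside Pre_.
def dotsWhile (extra : Int) (dist : List Int) (n : Nat) : List Int :=
  if h : 0 < extra ∧ 0 < n then
    dotsWhile (dotsFor (List.range n) extra dist).1 (dotsFor (List.range n) extra dist).2 n
  else dist
termination_by extra.toNat
decreasing_by
  exact dotsFor_fst_lt (List.range n) extra dist h.1 (by simp; omega)

def dots (extra : Int) (words : Int) : List Int :=
  let distribution := List.replicate (words - 1).toNat 0
  if words = 1 then [extra]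
  else (dotsWhile extra distribution (words - 1).toNat) ++ [0]

-- ===== PORT B =====
def dots_alt (extra : Int) (words : Int) : List Int :=
  if words = 1 then [extra]
  else
    let n := words - 1
    let q := PySem.Int.floordiv extra n
    let r := PySem.Int.mod extra n
    List.replicate r.toNat (q + 1) ++ List.replicate (n - r).toNat q ++ [0]

-- ===== PRECONDITION & SPEC =====
-- Pre_ excludes exactly the inputs on which A's while-loop never terminates:
-- extra < 0 (with words ≠ 1), or extra > 0 with words ≤ 0 (no gaps to fill).
def Pre_dots (extra : Int) (words : Int) : Prop :=
  words = 1 ∨ extra = 0 ∨ (0 ≤ extra ∧ 2 ≤ words)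
instance (extra : Int) (words : Int) : Decidable (Pre_dots extra words) := by
  unfold Pre_dots; infer_instance
def pvWitness_dots : Int × Int := (7, 4)

def Spec_dots (extra : Int) (words : Int) (out : List Int) : Prop := out = dots_alt extra words
instance (extra : Int) (words : Int) (out : List Int) : Decidable (Spec_dots extra words out) := by
  unfold Spec_dots; infer_instance

-- ===== CLAIM (what is proved, stated in full; the proofs are below) =====
def Claim_equal_dots : Prop := ∀ (extra : Int) (words : Int), Dom_dots extra words → Pre_dots extra words → Spec_dots extra words (dots extra words)

-- ===== LEMMAS AND PROOFS =====

-- step function of one increment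
def dotsStep (d : List Int) (x : Nat) : List Int := d.set x (d.getD x 0 + 1)

theorem dotsFor_full (xs : List Nat) (extra : Int) (dist : List Int)
    (h : (xs.length : Int) ≤ extra) :
    dotsFor xs extra dist = (extra - xs.length, xs.foldl dotsStep dist) := by
  induction xs generalizing extra dist with
  | nil => simp [dotsFor]
  | cons x xs ih =>
    simp only [List.length_cons] at h
    push_cast at h
    simp only [dotsFor, if_pos (by omega : extra ≠ 0), List.foldl_cons]
    rw [ih _ _ (by omega)]
    simp only [dotsStep, List.length_cons]
    congr 1
    push_cast; ring

theorem dotsFor_partial (xs : List Nat) (extra : Int) (dist : List Int)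
    (h0 : 0 ≤ extra) (h : extra ≤ (xs.length : Int)) :
    dotsFor xs extra dist = (0, (xs.take extra.toNat).foldl dotsStep dist) := by
  induction xs generalizing extra dist with
  | nil =>
    have : extra = 0 := by simp at h; omega
    subst this; simp [dotsFor]
  | cons x xs ih =>
    by_cases he : extra = 0
    · subst he; simp [dotsFor]
    · simp only [List.length_cons] at h
      push_cast at h
      simp only [dotsFor, if_pos he]
      rw [ih _ _ (by omega) (by omega)]
      have : extra.toNat = (extra - 1).toNat + 1 := by omega
      rw [this]
      simp [List.take_succ_cons, dotsStep]

-- folding increments over range r on a balanced list of length n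
theorem foldl_step_range (n r : Nat) (c : Int) (hr : r ≤ n) :
    (List.range r).foldl dotsStep (List.replicate n c)
      = List.replicate r (c + 1) ++ List.replicate (n - r) c := by
  induction r with
  | zero => simp
  | succ r ih =>
    rw [List.range_succ, List.foldl_append, ih (by omega)]
    simp only [List.foldl_cons, List.foldl_nil, dotsStep]
    have hlt : r < n := hr
    have hgd : (List.replicate r (c + 1) ++ List.replicate (n - r) c).getD r 0 = c := by
      rw [List.getD_eq_getElem?_getD, List.getElem?_append_right (by simp)]
      simp [(by omega : 0 < n - r)]
    rw [hgd]
    have hset : (List.replicate r (c + 1) ++ List.replicate (n - r) c).set r (c + 1)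
        = List.replicate (r + 1) (c + 1) ++ List.replicate (n - (r + 1)) c := by
      have hnr : n - r = (n - (r + 1)) + 1 := by omega
      rw [hnr, List.replicate_succ, List.set_append_right _ _ (by simp),
        List.length_replicate]
      simp [List.replicate_succ' (n := r)]
    rw [hset]

theorem dotsWhile_balanced (n : Nat) (hn : 0 < n) (extra : Int) (c : Int) (h0 : 0 ≤ extra) :
    dotsWhile extra (List.replicate n c) n
      = List.replicate (PySem.Int.mod extra n).toNat (c + PySem.Int.floordiv extra n + 1)
        ++ List.replicate (n - (PySem.Int.mod extra n).toNat) (c + PySem.Int.floordiv extra n) := by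
  have hnpos : (0 : Int) < (n : Int) := by exact_mod_cast hn
  induction hk : extra.toNat using Nat.strong_induction_on generalizing extra c with
  | _ k ih =>
  by_cases hz : extra = 0
  · subst hz
    rw [dotsWhile]
    simp [PySem.Int.mod, PySem.Int.floordiv]
  · have hpos : 0 < extra := by omega
    rw [dotsWhile, dif_pos ⟨hpos, hn⟩]
    by_cases hbig : (n : Int) ≤ extra
    · rw [dotsFor_full _ _ _ (by simpa using hbig)]
      simp only [List.length_range]
      rw [foldl_step_range n n c le_rfl]
      simp only [Nat.sub_self, List.replicate_zero, List.append_nil]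
      rw [ih (extra - n).toNat (by omega) (extra - n) (c + 1) (by omega) rfl]
      have hq : PySem.Int.floordiv (extra - n) n = PySem.Int.floordiv extra n - 1 := by
        rw [PySem.Int.floordiv_eq_ediv_of_pos hnpos, PySem.Int.floordiv_eq_ediv_of_pos hnpos]
        have : extra - n = extra + (-1) * n := by ring
        rw [this, Int.add_mul_ediv_right _ _ (by omega : (n:Int) ≠ 0)]; ring
      have hm : PySem.Int.mod (extra - n) n = PySem.Int.mod extra n := by
        rw [PySem.Int.mod_eq_emod_of_pos hnpos, PySem.Int.mod_eq_emod_of_pos hnpos]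
        exact Int.sub_emod_right extra n
      rw [hq, hm]
      congr 2 <;> ring
    · push Not at hbig
      rw [dotsFor_partial _ _ _ (by omega) (by simp; omega)]
      rw [List.take_range, foldl_step_range n (min extra.toNat n) c (by omega)]
      have hmin : min extra.toNat n = extra.toNat := by omega
      rw [hmin]
      rw [dotsWhile, dif_neg (by simp)]
      have hq : PySem.Int.floordiv extra n = 0 := by
        rw [PySem.Int.floordiv_eq_ediv_of_pos hnpos]
        exact Int.ediv_eq_zero_of_lt (by omega) hbig
      have hm : PySem.Int.mod extra n = extra := by
        rw [PySem.Int.mod_eq_emod_of_pos hnpos]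
        exact Int.emod_eq_of_lt (by omega) hbig
      rw [hq, hm]
      simp

-- ===== VERDICT (by name: the statement is the Claim_ definition above) =====
theorem dots_spec : Claim_equal_dots := by
  intro extra words _ hpre
  unfold Spec_dots dots dots_alt
  by_cases h1 : words = 1
  · simp [h1]
  · simp only [if_neg h1]
    by_cases h2 : 2 ≤ words
    · have hex : 0 ≤ extra := by rcases hpre with h | h | h <;> omega
      have hn : 0 < (words - 1).toNat := by omega
      have hcast : ((words - 1).toNat : Int) = words - 1 := by omega
      rw [dotsWhile_balanced _ hn _ 0 hex]
      rw [hcast]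
      have hmlt : PySem.Int.mod extra (words - 1) < words - 1 :=
        PySem.Int.mod_lt extra (by omega)
      have hmge : 0 ≤ PySem.Int.mod extra (words - 1) :=
        PySem.Int.mod_nonneg extra (by omega)
      have : ((words - 1) - PySem.Int.mod extra (words - 1)).toNat
          = (words - 1).toNat - (PySem.Int.mod extra (words - 1)).toNat := by omega
      rw [this]
      simp
    · -- words ≤ 0 and (by Pre_) extra = 0: distribution is empty, loop exits at once
      have hw : words ≤ 0 := by omega
      have hex : extra = 0 := by rcases hpre with h | h | h <;> omega
      subst hex
      have hrep : (words - 1).toNat = 0 := by omega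
      rw [hrep]
      rw [dotsWhile, dif_neg (by simp)]
      simp [PySem.Int.mod, PySem.Int.floordiv]
      omega
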